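-- pv_equiv track=rewrite | github.com/tjakopec/DESS2021 | love_calculator.py | calculate_percentage
-- ===== SOURCE A (Python) =====
-- def calculate_percentage(numbers):
--     number = int(''.join(str(b) for b in numbers))
--     if number < 100:
--         return number
--     else:
--         new_numbers=[]
--         if len(numbers) % 2 == 0:
--             for i in range(0,len(numbers),2):
--                 sum_of_numbers = numbers[i] + numbers[i+1]
--                 if sum_of_numbers >= 10:
--                     sum_of_numbers=sum_of_numbers % 10
--                 new_numbers.append(sum_of_numbers)
--         else:
--             for i in range(0,len(numbers)-1,2):
--                 sum_of_numbers = numbers[i] + numbers[i+1]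
--                 if sum_of_numbers >= 10:
--                     sum_of_numbers=sum_of_numbers % 10
--                 new_numbers.append(sum_of_numbers)
--             new_numbers.append(numbers[-1])
--         return calculate_percentage(new_numbers)
-- ===== SOURCE B (Python) =====
-- def calculate_percentage(numbers):
--     # Iterative version: a while-loop instead of recursion, and one pair-consuming
--     # loop (take two, sum, mod-10 if >= 10) instead of the parity-branched index loop.
--     while True:
--         number = int(''.join(str(b) for b in numbers))
--         if number < 100:
--             return number
--         reduced = []
--         rest = numbers
--         while len(rest) >= 2:
--             s = rest[0] + rest[1]
--             reduced.append(s % 10 if s >= 10 else s)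
--             rest = rest[2:]
--         numbers = reduced + rest
-- ===== Notes on version B (the rewrite author's own statement) =====
-- stated objective: alternative
-- what changed: Tail recursion becomes a while-loop, and the two parity-branched index loops (range(0,len,2) with numbers[i]/numbers[i+1] and a special trailing append) become a single pair-consuming loop that destructures the first two elements and carries the leftover element automatically.
import Mathlib
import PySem

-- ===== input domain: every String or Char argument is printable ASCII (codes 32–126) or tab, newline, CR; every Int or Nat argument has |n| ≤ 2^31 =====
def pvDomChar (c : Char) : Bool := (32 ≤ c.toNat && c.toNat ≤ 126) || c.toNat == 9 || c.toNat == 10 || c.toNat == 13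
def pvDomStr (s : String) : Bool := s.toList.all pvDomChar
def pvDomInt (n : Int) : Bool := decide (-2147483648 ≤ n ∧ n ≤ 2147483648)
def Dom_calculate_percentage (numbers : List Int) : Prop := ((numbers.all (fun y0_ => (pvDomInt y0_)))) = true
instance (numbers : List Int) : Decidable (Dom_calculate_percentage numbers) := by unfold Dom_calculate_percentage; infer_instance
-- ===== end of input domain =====

-- B replaces A's tail recursion by a while-loop and A's two parity-branched index loops
-- by one pair-consuming loop (alternative decomposition, same cost).


-- ===== PORT A =====
-- int(''.join(str(b) for b in numbers)); none = ValueError (shared: the identical expression occurs in both Pythons)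
def pvJoinInt? (numbers : List Int) : Option Int :=
  PySem.Int.ofStr? (PySem.Str.join "" (numbers.map PySem.Int.toStr))

-- body of A's for-loops: new_numbers.append(sum, mod-10'ed when >= 10)
def pvPairStepA (numbers acc : List Int) (i : Int) : List Int :=
  let s := PySem.List.pyGetD numbers i 0 + PySem.List.pyGetD numbers (i + 1) 0
  acc ++ [if 10 ≤ s then PySem.Int.mod s 10 else s]

-- A's recursion; fuel (numbers.length + 1 bounds the depth) only makes it total,
-- the 0-defaults are never reached on inputs where the Python returns.
def pvCalcA : Nat → List Int → Int
  | 0, _ => 0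
  | fuel + 1, numbers =>
    match pvJoinInt? numbers with
    | none => 0
    | some number =>
      if number < 100 then number
      else
        let new_numbers : List Int :=
          if numbers.length % 2 = 0 then
            (PySem.List.pyRange 0 (numbers.length : Int) 2).foldl (pvPairStepA numbers) []
          else
            ((PySem.List.pyRange 0 ((numbers.length : Int) - 1) 2).foldl (pvPairStepA numbers) [])
              ++ [PySem.List.pyGetD numbers (-1) 0]
        pvCalcA fuel new_numbers

def calculate_percentage (numbers : List Int) : Int := pvCalcA (numbers.length + 1) numbers

-- ===== PORT B =====
-- B's inner while-loop: consume two elements at a time, leftover rides along at the end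
def pvPairLoop (reduced rest : List Int) : List Int :=
  match rest with
  | a :: b :: rest' =>
    let s := a + b
    pvPairLoop (reduced ++ [if 10 ≤ s then PySem.Int.mod s 10 else s]) rest'
  | _ => reduced ++ rest

-- B's outer while-loop; same fuel device as port A
def pvCalcB : Nat → List Int → Int
  | 0, _ => 0
  | fuel + 1, numbers =>
    match pvJoinInt? numbers with
    | none => 0
    | some number =>
      if number < 100 then number
      else pvCalcB fuel (pvPairLoop [] numbers)

def calculate_percentage_alt (numbers : List Int) : Int := pvCalcB (numbers.length + 1) numbers

-- ===== PRECONDITION & SPEC =====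
-- Pre_ excludes exactly the inputs where A raises: the empty list and any negative element
-- after the first (ValueError from int('' .join …)), and a single element ≥ 100 (unbounded
-- recursion, RecursionError).
def Pre_calculate_percentage (numbers : List Int) : Prop :=
  numbers ≠ [] ∧ (∀ y ∈ numbers.tail, 0 ≤ y) ∧ (numbers.length = 1 → numbers.getD 0 0 < 100)
instance (numbers : List Int) : Decidable (Pre_calculate_percentage numbers) := by
  unfold Pre_calculate_percentage; infer_instance

def pvWitness_calculate_percentage : List Int := [5, 6, 7]

def Spec_calculate_percentage (numbers : List Int) (out : Int) : Prop := out = calculate_percentage_alt numbers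
instance (numbers : List Int) (out : Int) : Decidable (Spec_calculate_percentage numbers out) := by unfold Spec_calculate_percentage; infer_instance

-- ===== CLAIM (what is proved, stated in full; the proofs are below) =====
def Claim_equal_calculate_percentage : Prop := ∀ (numbers : List Int), Dom_calculate_percentage numbers → Pre_calculate_percentage numbers → Spec_calculate_percentage numbers (calculate_percentage numbers)

-- ===== LEMMAS AND PROOFS =====

-- proof-side abbreviation for the shared per-pair transform
def pvF (s : Int) : Int := if 10 ≤ s then PySem.Int.mod s 10 else s

-- proof-side specification of one reduction round
def pvPairsSpec : List Int → List Int
  | a :: b :: r => pvF (a + b) :: pvPairsSpec r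
  | r => r

lemma pvPairLoop_eq (rest : List Int) : ∀ acc, pvPairLoop acc rest = acc ++ pvPairsSpec rest := by
  match rest with
  | [] => intro acc; simp [pvPairLoop, pvPairsSpec]
  | [x] => intro acc; simp [pvPairLoop, pvPairsSpec]
  | a :: b :: r =>
    intro acc
    rw [pvPairLoop, pvPairLoop_eq r]
    simp [pvPairsSpec, pvF]
termination_by rest.length

lemma pvRange2 (k : Nat) :
    PySem.List.pyRange 0 (2 * (k : Int)) 2 = (List.range k).map (fun j : Nat => 2 * (j : Int)) := by
  rw [PySem.List.pyRange_of_pos _ _ (by norm_num)]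
  rcases Nat.eq_zero_or_pos k with hk | hk
  · subst hk; simp
  · have h1 : (0 : Int) < 2 * (k : Int) := by positivity
    rw [if_pos h1]
    have : ((2 * (k : Int) - 0 + 2 - 1) / 2).toNat = k := by omega
    rw [this]
    simp only [zero_add]

lemma pvMapPairs (k : Nat) (xs : List Int) (h1 : 2 * k ≤ xs.length) (h2 : xs.length ≤ 2 * k + 1) :
    (List.range k).map (fun j => pvF (xs.getD (2 * j) 0 + xs.getD (2 * j + 1) 0)) ++ xs.drop (2 * k)
      = pvPairsSpec xs := by
  induction k generalizing xs with
  | zero =>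
    match xs, h2 with
    | [], _ => simp [pvPairsSpec]
    | [x], _ => simp [pvPairsSpec]
  | succ k ih =>
    match xs, h1 with
    | a :: b :: r, h1' =>
      have hr1 : 2 * k ≤ r.length := by simp at h1'; omega
      have hr2 : r.length ≤ 2 * k + 1 := by simp at h2; omega
      rw [List.range_succ_eq_map]
      simp only [List.map_cons, List.map_map]
      have e1 : ∀ j : Nat,
          ((fun j => pvF ((a :: b :: r).getD (2 * j) 0 + (a :: b :: r).getD (2 * j + 1) 0)) ∘ Nat.succ) j
            = pvF (r.getD (2 * j) 0 + r.getD (2 * j + 1) 0) := by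
        intro j
        have h21 : 2 * (j + 1) = 2 * j + 1 + 1 := by omega
        simp [Function.comp, h21]
      rw [List.map_congr_left (fun j _ => e1 j)]
      have hd : (a :: b :: r).drop (2 * (k + 1)) = r.drop (2 * k) := by
        have h22 : 2 * (k + 1) = 2 * k + 2 := by omega
        simp [h22]
      rw [hd]
      simp only [pvPairsSpec, List.getD]
      rw [List.cons_append]
      congr 1
      exact ih r hr1 hr2

-- one reduction round of port A equals one round of port B
lemma pvRound_eq (xs : List Int) :
    (if xs.length % 2 = 0 then
        (PySem.List.pyRange 0 (xs.length : Int) 2).foldl (pvPairStepA xs) []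
      else
        ((PySem.List.pyRange 0 ((xs.length : Int) - 1) 2).foldl (pvPairStepA xs) [])
          ++ [PySem.List.pyGetD xs (-1) 0])
      = pvPairLoop [] xs := by
  have key : ∀ k : Nat, 2 * k ≤ xs.length →
      (PySem.List.pyRange 0 (2 * (k : Int)) 2).foldl (pvPairStepA xs) []
        = (List.range k).map (fun j : Nat => pvF (xs.getD (2 * j) 0 + xs.getD (2 * j + 1) 0)) := by
    intro k hk
    rw [pvRange2, List.foldl_map]
    have : ∀ (acc : List Int) (j : Nat),
        pvPairStepA xs acc (2 * (j : Int))
          = acc ++ [pvF (xs.getD (2 * j) 0 + xs.getD (2 * j + 1) 0)] := by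
      intro acc j
      have c1 : (2 * (j : Int)) = ((2 * j : Nat) : Int) := by push_cast; ring
      have c2 : ((2 * j : Nat) : Int) + 1 = ((2 * j + 1 : Nat) : Int) := by push_cast; ring
      simp only [pvPairStepA, c1, c2, PySem.List.pyGetD_natCast, pvF]
    simp only [this]
    rw [PySem.List.foldl_append_singleton_eq_map, List.nil_append]
  rw [pvPairLoop_eq]
  simp only [List.nil_append]
  by_cases hpar : xs.length % 2 = 0
  · rw [if_pos hpar]
    have hk : xs.length = 2 * (xs.length / 2) := by omega
    have hcast : (xs.length : Int) = 2 * ((xs.length / 2 : Nat) : Int) := by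
      push_cast; omega
    rw [hcast, key (xs.length / 2) (by omega)]
    have := pvMapPairs (xs.length / 2) xs (by omega) (by omega)
    rw [← this]
    have hdrop : List.drop (2 * (xs.length / 2)) xs = [] := List.drop_eq_nil_of_le (by omega)
    rw [hdrop, List.append_nil]
  · rw [if_neg hpar]
    have hne : xs ≠ [] := by
      intro h; subst h; simp at hpar
    have hk : xs.length = 2 * (xs.length / 2) + 1 := by omega
    have hcast : (xs.length : Int) - 1 = 2 * ((xs.length / 2 : Nat) : Int) := by
      push_cast; omega
    rw [hcast, key (xs.length / 2) (by omega)]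
    have := pvMapPairs (xs.length / 2) xs (by omega) (by omega)
    rw [← this]
    congr 1
    rw [PySem.List.pyGetD_neg_one xs 0 hne]
    have hlen : 2 * (xs.length / 2) = xs.length - 1 := by omega
    rw [hlen, List.drop_length_sub_one hne]

lemma pvCalc_eq (fuel : Nat) : ∀ xs : List Int, pvCalcA fuel xs = pvCalcB fuel xs := by
  induction fuel with
  | zero => intro xs; rfl
  | succ fuel ih =>
    intro xs
    simp only [pvCalcA, pvCalcB]
    cases pvJoinInt? xs with
    | none => rfl
    | some number =>
      by_cases h : number < 100
      · simp [h]
      · simp only [if_neg h]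
        rw [pvRound_eq xs]
        exact ih _

-- ===== VERDICT (by name: the statement is the Claim_ definition above) =====
theorem calculate_percentage_spec : Claim_equal_calculate_percentage := by
  intro numbers _ _
  unfold Spec_calculate_percentage calculate_percentage calculate_percentage_alt
  exact pvCalc_eq _ numbers
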